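-- pv_equiv track=rewrite | github.com/twpro8/streaming-service | services/catalog/tests/utils.py | first_group
-- ===== SOURCE A (Python) =====
-- from typing import Any, Hashable, Callable
--
-- def first_group(
--     items: list[dict[str, Any]],
--     group_by: str,
--     n: int,
-- ) -> list[dict[str, Any]]:
--     seen: dict[Hashable, list[dict[str, Any]]] = {}
--     for item in items:
--         group = item[group_by]
--         seen.setdefault(group, []).append(item)
--         if len(seen[group]) == n:
--             return seen[group]
--
--     raise ValueError(f"No group found with {n} items")
-- ===== SOURCE B (Python) =====
-- def first_group(
--     items,
--     group_by,
--     n,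
-- ):
--     counts = {}
--     for item in items:
--         group = item[group_by]
--         counts[group] = counts.get(group, 0) + 1
--         if counts[group] == n:
--             out = []
--             for it in items:
--                 if it[group_by] == group:
--                     out.append(it)
--                     if len(out) == n:
--                         break
--             return out
--
--     raise ValueError(f"No group found with {n} items")
-- ===== Notes on version B (the rewrite author's own statement) =====
-- stated objective: alternative
-- what changed: B keeps only per-group counts (group -> int) instead of materialising a dict of per-group lists; when a count first reaches n it rebuilds the answer in a second filtered pass over items that stops at the n-th match.
import Mathlib
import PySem

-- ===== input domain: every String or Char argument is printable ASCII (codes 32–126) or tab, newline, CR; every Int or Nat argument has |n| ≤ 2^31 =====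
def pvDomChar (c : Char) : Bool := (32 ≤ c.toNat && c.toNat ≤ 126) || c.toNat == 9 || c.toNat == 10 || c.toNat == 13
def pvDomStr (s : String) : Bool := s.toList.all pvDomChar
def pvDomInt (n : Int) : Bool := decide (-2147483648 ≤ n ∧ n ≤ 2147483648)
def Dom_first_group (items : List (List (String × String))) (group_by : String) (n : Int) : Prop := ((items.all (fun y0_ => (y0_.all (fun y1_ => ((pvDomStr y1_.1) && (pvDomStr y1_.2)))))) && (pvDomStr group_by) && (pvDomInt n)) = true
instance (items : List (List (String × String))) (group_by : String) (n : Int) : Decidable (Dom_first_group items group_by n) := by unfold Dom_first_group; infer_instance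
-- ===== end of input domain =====

-- B replaces A's dict of per-group lists by a dict of per-group counts plus a
-- second reconstruction pass over items that stops at the n-th match (objective: alternative).


-- ===== PORT A =====
-- item[group_by] : dict lookup (none = KeyError, excluded by Pre_; the port returns [] there).
def fgKey (group_by : String) (item : List (String × String)) : Option String :=
  (PySem.Dict.mk item).get? group_by

-- the for-loop of A: seen maps group -> list of its items so far
def fgGoA (group_by : String) (n : Int) :
    List (List (String × String)) → PySem.Dict String (List (List (String × String))) →
    List (List (String × String))
  | [], _ => []            -- falls through: raise ValueError (excluded by Pre_)
  | item :: rest, seen =>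
    match fgKey group_by item with
    | none => []           -- KeyError (excluded by Pre_)
    | some g =>
      let cur := (seen.getD g []) ++ [item]   -- seen.setdefault(group, []).append(item)
      if (cur.length : Int) = n then cur
      else fgGoA group_by n rest (seen.insert g cur)

def first_group (items : List (List (String × String))) (group_by : String) (n : Int) : List (List (String × String)) :=
  fgGoA group_by n items PySem.Dict.empty

-- ===== PORT B =====
-- reconstruction pass: collect items whose key equals g, breaking at the n-th match
def fgCollect (group_by g : String) (n : Int) :
    List (List (String × String)) → List (List (String × String)) →
    List (List (String × String))
  | [], out => out
  | it :: rest, out =>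
    match fgKey group_by it with
    | none => []           -- KeyError (unreachable under Pre_)
    | some v =>
      if v == g then
        let out' := out ++ [it]
        if (out'.length : Int) = n then out' else fgCollect group_by g n rest out'
      else fgCollect group_by g n rest out

-- the for-loop of B: counts maps group -> number of its items so far
def fgGoB (items : List (List (String × String))) (group_by : String) (n : Int) :
    List (List (String × String)) → PySem.Dict String Int →
    List (List (String × String))
  | [], _ => []            -- falls through: raise ValueError (excluded by Pre_)
  | item :: rest, counts =>
    match fgKey group_by item with
    | none => []           -- KeyError (excluded by Pre_)
    | some g =>
      let c := counts.getD g 0 + 1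
      if c = n then fgCollect group_by g n items []
      else fgGoB items group_by n rest (counts.insert g c)

def first_group_alt (items : List (List (String × String))) (group_by : String) (n : Int) : List (List (String × String)) :=
  fgGoB items group_by n items PySem.Dict.empty

-- ===== PRECONDITION & SPEC =====
-- Pre_ = exactly the inputs on which Python A returns: some index k such that every item
-- up to k has the key group_by and the group of items[k] reaches exactly n members at k
-- (otherwise A raises KeyError or ValueError).
def Pre_first_group (items : List (List (String × String))) (group_by : String) (n : Int) : Prop :=
  ∃ k, k < items.length ∧
    (∀ j, j ≤ k → (fgKey group_by (items.getD j [])).isSome = true) ∧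
    (((items.take (k + 1)).countP
        (fun it => fgKey group_by it == fgKey group_by (items.getD k [])) : Int) = n)
instance (items : List (List (String × String))) (group_by : String) (n : Int) : Decidable (Pre_first_group items group_by n) := by unfold Pre_first_group; infer_instance

def pvWitness_first_group : (List (List (String × String))) × String × Int :=
  ([[("a", "x")], [("a", "x")]], "a", 2)

def Spec_first_group (items : List (List (String × String))) (group_by : String) (n : Int) (out : List (List (String × String))) : Prop := out = first_group_alt items group_by n
instance (items : List (List (String × String))) (group_by : String) (n : Int) (out : List (List (String × String))) : Decidable (Spec_first_group items group_by n out) := by unfold Spec_first_group; infer_instance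

-- ===== CLAIM (what is proved, stated in full; the proofs are below) =====
def Claim_equal_first_group : Prop := ∀ (items : List (List (String × String))) (group_by : String) (n : Int), Dom_first_group items group_by n → Pre_first_group items group_by n → Spec_first_group items group_by n (first_group items group_by n)

-- ===== LEMMAS AND PROOFS =====

-- the group-membership predicate used by the invariants
def fgMatch (group_by g : String) (it : List (String × String)) : Bool :=
  fgKey group_by it == some g

lemma fgCollect_run (group_by g : String) (n : Int) :
    ∀ (p : List (List (String × String))) (out rest : List (List (String × String)))
      (item : List (String × String)),
      (∀ it ∈ p, (fgKey group_by it).isSome = true) →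
      fgKey group_by item = some g →
      (out.length : Int) + ((p.filter (fgMatch group_by g)).length : Int) + 1 = n →
      fgCollect group_by g n (p ++ item :: rest) out
        = out ++ p.filter (fgMatch group_by g) ++ [item] := by
  intro p
  induction p with
  | nil =>
    intro out rest item _ hitem hn
    simp only [List.filter_nil, List.length_nil, Nat.cast_zero, add_zero] at hn
    have hc : ((out ++ [item]).length : Int) = n := by
      simp only [List.length_append, List.length_cons, List.length_nil]
      push_cast; omega
    simp [fgCollect, hitem]
    exact fun h => absurd hn h
  | cons x p' ih =>
    intro out rest item hkeys hitem hn
    obtain ⟨v, hv⟩ := Option.isSome_iff_exists.mp (hkeys x (by simp))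
    by_cases hvg : v = g
    · have hm : fgMatch group_by g x = true := by simp [fgMatch, hv, hvg]
      rw [List.filter_cons_of_pos hm] at hn
      simp only [List.length_cons] at hn
      have hn' : ((out ++ [x]).length : Int)
          + ((p'.filter (fgMatch group_by g)).length : Int) + 1 = n := by
        simp only [List.length_append, List.length_cons, List.length_nil]
        push_cast at hn ⊢; omega
      have hlen : ¬ (((out ++ [x]).length : Int) = n) := by
        simp only [List.length_append, List.length_cons, List.length_nil] at hn' ⊢
        push_cast at hn' ⊢; omega
      have hrec := ih (out ++ [x]) rest item (fun it hit => hkeys it (by simp [hit])) hitem hn'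
      rw [List.cons_append]
      simp only [fgCollect, hv, hvg, BEq.rfl, if_pos, if_neg hlen, hrec,
        List.filter_cons_of_pos hm]
      simp
    · have hne : (v == g) = false := beq_eq_false_iff_ne.mpr hvg
      have hm : fgMatch group_by g x = false := by
        simp only [fgMatch, hv, Option.some_beq_some]; exact hne
      rw [List.filter_cons_of_neg (by simp [hm])] at hn
      have hrec := ih out rest item (fun it hit => hkeys it (by simp [hit])) hitem hn
      rw [List.cons_append]
      simp [fgCollect, hv, hne, hrec, hm]

lemma fgGo_eq (items : List (List (String × String))) (group_by : String) (n : Int) :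
    ∀ (rest p : List (List (String × String)))
      (seen : PySem.Dict String (List (List (String × String))))
      (counts : PySem.Dict String Int),
      items = p ++ rest →
      (∀ it ∈ p, (fgKey group_by it).isSome = true) →
      (∀ g, seen.getD g [] = p.filter (fgMatch group_by g)) →
      (∀ g, counts.getD g 0 = ((p.filter (fgMatch group_by g)).length : Int)) →
      fgGoA group_by n rest seen = fgGoB items group_by n rest counts := by
  intro rest
  induction rest with
  | nil => intro p seen counts _ _ _ _; simp [fgGoA, fgGoB]
  | cons item rest' ih =>
    intro p seen counts hsplit hkeys hseen hcounts
    match hk : fgKey group_by item with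
    | none => simp [fgGoA, fgGoB, hk]
    | some g =>
      simp only [fgGoA, fgGoB, hk]
      have hmg : fgMatch group_by g item = true := by simp [fgMatch, hk]
      have hcur : seen.getD g [] ++ [item] = (p ++ [item]).filter (fgMatch group_by g) := by
        rw [hseen g, List.filter_append]
        simp [hmg]
      have hclen : ((seen.getD g [] ++ [item]).length : Int) = counts.getD g 0 + 1 := by
        rw [hseen g]
        simp only [List.length_append, List.length_cons, List.length_nil, hcounts g]
        push_cast; omega
      by_cases hn : counts.getD g 0 + 1 = n
      · have hins : (([] : List (List (String × String))).length : Int)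
            + ((p.filter (fgMatch group_by g)).length : Int) + 1 = n := by
          simp only [List.length_nil, Nat.cast_zero, zero_add]
          rw [← hcounts g]; exact hn
        rw [if_pos (by rw [hclen]; exact hn), if_pos hn, hsplit,
          fgCollect_run group_by g n p [] rest' item hkeys hk hins, hseen g]
        simp
      · rw [if_neg (by rw [hclen]; exact hn), if_neg hn]
        apply ih (p ++ [item])
        · simp [hsplit]
        · intro it hit
          rcases List.mem_append.mp hit with h | h
          · exact hkeys it h
          · simp only [List.mem_singleton] at h; subst h; simp [hk]
        · intro g'
          rw [PySem.Dict.getD_insert]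
          by_cases hg : g' = g
          · rw [if_pos hg, hg, hcur]
          · have hm' : fgMatch group_by g' item = false := by
              simp only [fgMatch, hk, Option.some_beq_some]
              exact beq_eq_false_iff_ne.mpr (fun h => hg h.symm)
            rw [if_neg hg, List.filter_append]
            simp [hm', hseen g']
        · intro g'
          rw [PySem.Dict.getD_insert]
          by_cases hg : g' = g
          · rw [if_pos hg, hg, ← hcur]
            exact hclen.symm
          · have hm' : fgMatch group_by g' item = false := by
              simp only [fgMatch, hk, Option.some_beq_some]
              exact beq_eq_false_iff_ne.mpr (fun h => hg h.symm)
            rw [if_neg hg, List.filter_append]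
            simp [hm', hcounts g']

lemma first_group_eq_alt (items : List (List (String × String))) (group_by : String) (n : Int) :
    first_group items group_by n = first_group_alt items group_by n := by
  unfold first_group first_group_alt
  exact fgGo_eq items group_by n items [] _ _ rfl (by simp)
    (fun g => by simp [PySem.Dict.getD_empty])
    (fun g => by simp [PySem.Dict.getD_empty])

-- ===== VERDICT (by name: the statement is the Claim_ definition above) =====
theorem first_group_spec : Claim_equal_first_group := by
  intro items group_by n _ _
  unfold Spec_first_group
  exact first_group_eq_alt items group_by n
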